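-- pv_equiv track=rewrite | github.com/less-nefariousness5/divest | ps_simc_parser/api/validator.py | is_valid_condition
-- ===== SOURCE A (Python) =====
-- def is_valid_condition(condition: str) -> bool:
--     """Check if a condition is valid."""
--     if not condition:
--         return False
--
--     # Handle negation
--     if condition.startswith('!'):
--         return is_valid_condition(condition[1:])
--
--     # Handle complex conditions with & and |
--     if '&' in condition:
--         return all(is_valid_condition(c.strip()) for c in condition.split('&'))
--     if '|' in condition:
--         return all(is_valid_condition(c.strip()) for c in condition.split('|'))
--
--     # Handle namespaces
--     if condition.startswith((
--         'Variables.', 'Mechanics.', 'Position.', 'Player.',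
--         'hero_tree.', 'talent.', 'buff.', 'debuff.',
--         'cooldown.', 'spell.', 'resource.'
--     )):
--         return True
--
--     # Handle special conditions
--     if condition in ('not.in.position', 'true', 'false'):
--         return True
--
--     # Handle numeric comparisons
--     if any(op in condition for op in ('>', '<', '>=', '<=', '==', '!=')):
--         return True
--
--     return False
-- ===== SOURCE B (Python) =====
-- def is_valid_condition(condition: str) -> bool:
--     """Check if a condition is valid (flat two-level split version).
--
--     Exploits that '&'-split parts contain no '&' and '|'-split parts contain
--     neither separator, so the unbounded recursion flattens to a fixed
--     conjunct/disjunct nesting with leading '!'s stripped at each level.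
--     """
--     prefixes = (
--         'Variables.', 'Mechanics.', 'Position.', 'Player.',
--         'hero_tree.', 'talent.', 'buff.', 'debuff.',
--         'cooldown.', 'spell.', 'resource.'
--     )
--     specials = ('not.in.position', 'true', 'false')
--     ops = ('>', '<', '>=', '<=', '==', '!=')
--
--     def leaf(s):
--         return s.startswith(prefixes) or s in specials or any(op in s for op in ops)
--
--     def norm(p):
--         return p.strip().lstrip('!')
--
--     d = condition.lstrip('!')
--     if not d:
--         return False
--     conjuncts = [norm(p) for p in d.split('&')] if '&' in d else [d]
--     return all(
--         c != '' and all(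
--             a != '' and leaf(a)
--             for a in ([norm(q) for q in c.split('|')] if '|' in c else [c])
--         )
--         for c in conjuncts
--     )
-- ===== Notes on version B (the rewrite author's own statement) =====
-- stated objective: alternative
-- what changed: Replaced the unbounded recursive descent by a non-recursive flattening: drop leading negation bangs, split once on the conjunction separator, split each conjunct once on the disjunction separator (normalising every split part by strip plus bang-stripping), and test every leaf with a single predicate; this is correct because split parts can never contain the separator that produced them, so the recursion depth is bounded by two.
import Mathlib
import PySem

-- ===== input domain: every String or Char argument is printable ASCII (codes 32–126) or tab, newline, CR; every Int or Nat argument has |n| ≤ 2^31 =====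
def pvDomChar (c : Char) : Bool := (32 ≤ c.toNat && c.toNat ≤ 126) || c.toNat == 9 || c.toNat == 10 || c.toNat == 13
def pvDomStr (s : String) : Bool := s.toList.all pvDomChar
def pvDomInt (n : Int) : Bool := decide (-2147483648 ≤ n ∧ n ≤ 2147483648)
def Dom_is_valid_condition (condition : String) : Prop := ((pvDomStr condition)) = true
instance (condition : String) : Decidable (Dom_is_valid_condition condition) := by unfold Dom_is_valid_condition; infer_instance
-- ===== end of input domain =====

-- B replaces A's unbounded recursion by a non-recursive two-level split (conjuncts of
-- disjuncts with '!'-stripping at each level); alternative decomposition, not claimed faster.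

-- shared literal constants (the tuples of the Python sources)
def pvPrefixes : List (List Char) :=
  ["Variables.".toList, "Mechanics.".toList, "Position.".toList, "Player.".toList,
   "hero_tree.".toList, "talent.".toList, "buff.".toList, "debuff.".toList,
   "cooldown.".toList, "spell.".toList, "resource.".toList]
def pvSpecials : List (List Char) := ["not.in.position".toList, "true".toList, "false".toList]
def pvOps : List (List Char) := [['>'], ['<'], ['>', '='], ['<', '='], ['=', '='], ['!', '=']]

-- total length of a list of char lists (termination measure helper for PORT A)
def pvSumLen (xs : List (List Char)) : Nat := (xs.map List.length).sum

-- termination lemmas for PORT A (cited in decreasing_by)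

theorem pv_go_sumLen (sep : List Char) (hsep : sep ≠ []) (fuel : Nat) :
    ∀ (l cur : List Char) (acc : List (List Char)), l.length ≤ fuel →
      pvSumLen (PySem.Chars.splitOn.go sep fuel l cur acc) ≤ pvSumLen acc + cur.length + l.length := by
  induction fuel with
  | zero =>
    intro l cur acc hl
    have hl0 : l = [] := List.eq_nil_of_length_eq_zero (Nat.le_zero.mp hl)
    subst hl0
    show pvSumLen (((cur.reverse ++ []) :: acc).reverse) ≤ _
    simp [pvSumLen]
  | succ fuel ih =>
    intro l cur acc hl
    cases l with
    | nil =>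
      show pvSumLen ((cur.reverse :: acc).reverse) ≤ _
      simp [pvSumLen]
    | cons c rest =>
      show pvSumLen (if sep.isPrefixOf (c::rest) then PySem.Chars.splitOn.go sep fuel (List.drop sep.length (c::rest)) [] (cur.reverse :: acc)
                     else PySem.Chars.splitOn.go sep fuel rest (c :: cur) acc) ≤ _
      split
      · rename_i hpre
        have hLc : (c::rest).length = rest.length + 1 := by simp
        have hsl : sep.length ≤ (c::rest).length := (List.isPrefixOf_iff_prefix.mp hpre).length_le
        have h1 : 1 ≤ sep.length := by cases sep with | nil => exact absurd rfl hsep | cons _ _ => simp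
        have := ih (List.drop sep.length (c::rest)) [] (cur.reverse :: acc)
          (by rw [List.length_drop]; omega)
        simp [pvSumLen] at this ⊢
        omega
      · have hLc : (c::rest).length = rest.length + 1 := by simp
        have := ih rest (c :: cur) acc (by omega)
        simp [pvSumLen] at this ⊢
        omega

theorem pv_go_sumLen_strict (sep : List Char) (hsep : sep ≠ []) (fuel : Nat) :
    ∀ (l cur : List Char) (acc : List (List Char)), l.length ≤ fuel → sep <:+: l →
      pvSumLen (PySem.Chars.splitOn.go sep fuel l cur acc) + sep.length ≤ pvSumLen acc + cur.length + l.length := by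
  induction fuel with
  | zero =>
    intro l cur acc hl hinf
    have hl0 : l = [] := List.eq_nil_of_length_eq_zero (Nat.le_zero.mp hl)
    subst hl0
    exact absurd (List.eq_nil_of_infix_nil hinf) hsep
  | succ fuel ih =>
    intro l cur acc hl hinf
    cases l with
    | nil => exact absurd (List.eq_nil_of_infix_nil hinf) hsep
    | cons c rest =>
      show pvSumLen (if sep.isPrefixOf (c::rest) then PySem.Chars.splitOn.go sep fuel (List.drop sep.length (c::rest)) [] (cur.reverse :: acc)
                     else PySem.Chars.splitOn.go sep fuel rest (c :: cur) acc) + sep.length ≤ _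
      split
      · rename_i hpre
        have hLc : (c::rest).length = rest.length + 1 := by simp
        have hsl : sep.length ≤ (c::rest).length := (List.isPrefixOf_iff_prefix.mp hpre).length_le
        have h1 : 1 ≤ sep.length := by cases sep with | nil => exact absurd rfl hsep | cons _ _ => simp
        have := pv_go_sumLen sep hsep fuel (List.drop sep.length (c::rest)) [] (cur.reverse :: acc)
          (by rw [List.length_drop]; omega)
        simp [pvSumLen] at this ⊢
        omega
      · rename_i hpre
        have hinf' : sep <:+: rest := by
          obtain ⟨s, t, hst⟩ := hinf
          cases s with
          | nil =>
            exfalso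
            exact hpre (List.isPrefixOf_iff_prefix.mpr ⟨t, by simpa using hst⟩)
          | cons a s' =>
            refine ⟨s', t, ?_⟩
            simp only [List.cons_append, List.cons_eq_cons] at hst
            simpa [List.append_assoc] using hst.2
        have hLc : (c::rest).length = rest.length + 1 := by simp
        have := ih rest (c :: cur) acc (by omega) hinf'
        simp [pvSumLen] at this ⊢
        omega

theorem pv_splitOn_sumLen_lt (c sep : List Char) (hsep : sep ≠ [])
    (hin : PySem.Chars.isIn sep c = true) :
    pvSumLen (PySem.Chars.splitOn c sep) < c.length := by
  have hinf : sep <:+: c := (PySem.Chars.isIn_iff_infix sep c).mp hin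
  have h1 : 1 ≤ sep.length := by cases sep with | nil => exact absurd rfl hsep | cons _ _ => simp
  have := pv_go_sumLen_strict sep hsep (c.length + 1) c [] [] (by omega) hinf
  simp [PySem.Chars.splitOn, pvSumLen] at this ⊢
  omega

theorem pv_mem_splitOn_strip_lt {p c sep : List Char} (hsep : sep ≠ [])
    (hin : PySem.Chars.isIn sep c = true) (hp : p ∈ PySem.Chars.splitOn c sep) :
    (PySem.Chars.strip p).length < c.length := by
  have h1 : (PySem.Chars.strip p).length ≤ p.length := by
    simp only [PySem.Chars.strip, PySem.Chars.rstrip, PySem.Chars.lstrip, List.length_reverse]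
    calc (List.dropWhile PySem.Chars.isspace (List.dropWhile PySem.Chars.isspace p).reverse).length
        ≤ (List.dropWhile PySem.Chars.isspace p).reverse.length := List.length_dropWhile_le _ _
      _ ≤ p.length := by simpa using List.length_dropWhile_le PySem.Chars.isspace p
  have h2 : p.length ≤ pvSumLen (PySem.Chars.splitOn c sep) := by
    have : p.length ∈ (PySem.Chars.splitOn c sep).map List.length := List.mem_map_of_mem hp
    exact List.le_sum_of_mem this
  have h3 := pv_splitOn_sumLen_lt c sep hsep hin
  omega

-- ===== PORT A =====
-- A's recursion, transliterated over the character list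
def is_valid_condition_go (c : List Char) : Bool :=
  if c.isEmpty then false
  else if PySem.Chars.startswith c ['!'] then is_valid_condition_go (List.drop 1 c)
  else if h₁ : PySem.Chars.isIn ['&'] c then
    (PySem.Chars.splitOn c ['&']).attach.all (fun p => is_valid_condition_go (PySem.Chars.strip p.1))
  else if h₂ : PySem.Chars.isIn ['|'] c then
    (PySem.Chars.splitOn c ['|']).attach.all (fun p => is_valid_condition_go (PySem.Chars.strip p.1))
  else if pvPrefixes.any (fun p => PySem.Chars.startswith c p) then true
  else if pvSpecials.contains c then true
  else if pvOps.any (fun op => PySem.Chars.isIn op c) then true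
  else false
termination_by c.length
decreasing_by
  · rename_i hne _
    have hc : c ≠ [] := by simpa [List.isEmpty_iff] using hne
    have hpos : 0 < c.length := List.length_pos_of_ne_nil hc
    rw [List.length_drop]
    omega
  · exact pv_mem_splitOn_strip_lt (by simp) h₁ p.2
  · exact pv_mem_splitOn_strip_lt (by simp) h₂ p.2

def is_valid_condition (condition : String) : Bool := is_valid_condition_go condition.toList

-- ===== PORT B =====
-- B is non-recursive: leading '!'s dropped, one '&' split into conjuncts, one '|' split
-- into disjuncts, each split part normalised by strip + lstrip('!'), then a leaf check.
def pvLeaf (s : List Char) : Bool :=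
  pvPrefixes.any (fun p => PySem.Chars.startswith s p)
    || pvSpecials.contains s
    || pvOps.any (fun op => PySem.Chars.isIn op s)

-- norm(p) = p.strip().lstrip('!')
def pvNorm (p : List Char) : List Char := (PySem.Chars.strip p).dropWhile (· == '!')

def pvDisjOk (a : List Char) : Bool := !a.isEmpty && pvLeaf a

def pvConjOk (c : List Char) : Bool :=
  !c.isEmpty &&
    (if PySem.Chars.isIn ['|'] c then ((PySem.Chars.splitOn c ['|']).map pvNorm).all pvDisjOk
     else pvDisjOk c)

def is_valid_condition_alt (condition : String) : Bool :=
  let d := condition.toList.dropWhile (· == '!')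
  if d.isEmpty then false
  else if PySem.Chars.isIn ['&'] d then ((PySem.Chars.splitOn d ['&']).map pvNorm).all pvConjOk
  else pvConjOk d

-- ===== PRECONDITION & SPEC =====
def Spec_is_valid_condition (condition : String) (out : Bool) : Prop := out = is_valid_condition_alt condition
instance (condition : String) (out : Bool) : Decidable (Spec_is_valid_condition condition out) := by unfold Spec_is_valid_condition; infer_instance

-- ===== CLAIM (what is proved, stated in full; the proofs are below) =====
def Claim_equal_is_valid_condition : Prop := ∀ (condition : String), Dom_is_valid_condition condition → Spec_is_valid_condition condition (is_valid_condition condition)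

-- ===== LEMMAS AND PROOFS =====

-- singleton infix = membership
theorem pv_singleton_infix {x : Char} {l : List Char} : [x] <:+: l ↔ x ∈ l := by
  constructor
  · intro h
    exact h.subset (by simp)
  · intro h
    obtain ⟨s, t, hst⟩ := List.append_of_mem h
    exact ⟨s, t, by simpa using hst.symm⟩

theorem pv_isIn_single (x : Char) (l : List Char) :
    PySem.Chars.isIn [x] l = true ↔ x ∈ l := by
  rw [PySem.Chars.isIn_iff_infix]; exact pv_singleton_infix

theorem pv_isIn_single_false (x : Char) (l : List Char) :
    PySem.Chars.isIn [x] l = false ↔ x ∉ l := by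
  rw [PySem.Chars.isIn_eq_false_iff]
  exact not_congr pv_singleton_infix

-- strip is a sublist
theorem pv_strip_sublist (p : List Char) : (PySem.Chars.strip p).Sublist p := by
  simp only [PySem.Chars.strip, PySem.Chars.rstrip, PySem.Chars.lstrip]
  have h1 : (List.dropWhile PySem.Chars.isspace
      (List.dropWhile PySem.Chars.isspace p).reverse).Sublist
      (List.dropWhile PySem.Chars.isspace p).reverse := List.dropWhile_sublist _
  have h2 := h1.reverse
  simp only [List.reverse_reverse] at h2
  exact h2.trans (List.dropWhile_sublist _)

theorem pv_norm_sublist (p : List Char) : (pvNorm p).Sublist p :=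
  (List.dropWhile_sublist _).trans (pv_strip_sublist p)

-- the head of dropWhile fails the predicate
theorem pv_head_dropWhile {α : Type} (q : α → Bool) :
    ∀ (l : List α) (a : α), (l.dropWhile q).head? = some a → q a = false := by
  intro l a h
  induction l with
  | nil => simp [List.dropWhile] at h
  | cons x t ih =>
    rw [List.dropWhile_cons] at h
    split at h
    · exact ih h
    · rename_i hx
      simp at h
      subst h
      simpa using hx

-- every part produced by a single-character split is sep-free and a sublist of the input
theorem pv_go_parts (x : Char) (fuel : Nat) :
    ∀ (l cur : List Char) (acc : List (List Char)) (c0 : List Char),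
      l.length ≤ fuel →
      x ∉ cur →
      (cur.reverse ++ l).Sublist c0 →
      (∀ a ∈ acc, x ∉ a ∧ a.Sublist c0) →
      ∀ p ∈ PySem.Chars.splitOn.go [x] fuel l cur acc, x ∉ p ∧ p.Sublist c0 := by
  induction fuel with
  | zero =>
    intro l cur acc c0 hl hcur hsub hacc p hp
    have hl0 : l = [] := List.eq_nil_of_length_eq_zero (Nat.le_zero.mp hl)
    subst hl0
    have hp' : p ∈ ((cur.reverse ++ []) :: acc).reverse := hp
    simp at hp'
    rcases hp' with h | h
    · exact hacc p h
    · subst h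
      exact ⟨by simpa using hcur, by simpa using hsub⟩
  | succ fuel ih =>
    intro l cur acc c0 hl hcur hsub hacc p hp
    cases l with
    | nil =>
      have hp' : p ∈ (cur.reverse :: acc).reverse := hp
      simp at hp'
      rcases hp' with h | h
      · exact hacc p h
      · subst h
        exact ⟨by simpa using hcur, by simpa using hsub⟩
    | cons c rest =>
      have hstep : PySem.Chars.splitOn.go [x] (fuel+1) (c::rest) cur acc
          = if [x].isPrefixOf (c::rest) then PySem.Chars.splitOn.go [x] fuel (List.drop 1 (c::rest)) [] (cur.reverse :: acc)
            else PySem.Chars.splitOn.go [x] fuel rest (c :: cur) acc := rfl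
      rw [hstep] at hp
      split at hp
      · rename_i hpre
        refine ih rest [] (cur.reverse :: acc) c0 (by simpa using hl) (by simp) ?_ ?_ p hp
        · exact ((List.sublist_cons_self c rest).trans
            ((List.sublist_append_right cur.reverse (c::rest)).trans hsub)).trans
            (List.Sublist.refl c0) |>.trans (List.Sublist.refl c0)
        · intro a ha
          rcases List.mem_cons.mp ha with h | h
          · subst h
            exact ⟨by simpa using hcur,
              (List.sublist_append_left cur.reverse (c::rest)).trans hsub⟩
          · exact hacc a h
      · rename_i hpre
        have hne : c ≠ x := by
          intro h
          subst h
          exact hpre (by simp [List.isPrefixOf])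
        refine ih rest (c :: cur) acc c0 (by simpa using hl) ?_ ?_ hacc p hp
        · intro h
          simp at h
          rcases h with h | h
          · exact hne h.symm
          · exact hcur h
        · simpa using hsub

theorem pv_mem_splitOn_single {p c : List Char} (x : Char)
    (hp : p ∈ PySem.Chars.splitOn c [x]) : x ∉ p ∧ p.Sublist c := by
  have := pv_go_parts x (c.length + 1) c [] [] c (by omega) (by simp) (by simp)
    (by intro a ha; simp at ha) p
  exact this (by simpa [PySem.Chars.splitOn] using hp)

-- A ignores leading '!'s
theorem pv_go_dropBangs : ∀ (c : List Char),
    is_valid_condition_go c = is_valid_condition_go (c.dropWhile (· == '!')) := by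
  intro c
  induction c with
  | nil => simp
  | cons h t ih =>
    by_cases hb : h = '!'
    · subst hb
      have hsw : PySem.Chars.startswith ('!' :: t) ['!'] = true := by
        rw [PySem.Chars.startswith_iff]
        exact ⟨t, rfl⟩
      rw [is_valid_condition_go.eq_def]
      simp only [List.isEmpty_cons, hsw, if_false, if_true, Bool.false_eq_true]
      rw [List.dropWhile_cons]
      simp only [beq_self_eq_true]
      simpa using ih
    · rw [List.dropWhile_cons]
      have : (h == '!') = false := by simpa using hb
      rw [this]
      simp

theorem pv_if_chain (b1 b2 b3 : Bool) :
    (if b1 then true else if b2 then true else if b3 then true else false) = (b1 || b2 || b3) := by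
  cases b1 <;> cases b2 <;> cases b3 <;> simp

-- leaf level: no leading '!', no '&', no '|'
theorem pv_go_leaf (c : List Char) (hb : c.head? ≠ some '!')
    (h1 : '&' ∉ c) (h2 : '|' ∉ c) :
    is_valid_condition_go c = pvDisjOk c := by
  cases c with
  | nil => rw [is_valid_condition_go.eq_def]; simp [pvDisjOk]
  | cons a t =>
    have hsw : PySem.Chars.startswith (a :: t) ['!'] = false := by
      rw [Bool.eq_false_iff]
      intro h
      rw [PySem.Chars.startswith_iff] at h
      obtain ⟨u, hu⟩ := h
      simp at hu
      exact hb (by simp [← hu.1])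
    have hI1 : PySem.Chars.isIn ['&'] (a :: t) = false := (pv_isIn_single_false _ _).mpr h1
    have hI2 : PySem.Chars.isIn ['|'] (a :: t) = false := (pv_isIn_single_false _ _).mpr h2
    rw [is_valid_condition_go.eq_def]
    simp only [List.isEmpty_cons, hsw, hI1, hI2, Bool.false_eq_true, if_false]
    rw [pv_if_chain]
    simp [pvDisjOk, pvLeaf]

-- pvNorm outputs never start with '!'
theorem pv_norm_head (p : List Char) : (pvNorm p).head? ≠ some '!' := by
  intro h
  have := pv_head_dropWhile (fun c => c == '!') (PySem.Chars.strip p) '!' h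
  simp at this

-- conjunct level: no leading '!', no '&'
theorem pv_go_conj (c : List Char) (hb : c.head? ≠ some '!') (h1 : '&' ∉ c) :
    is_valid_condition_go c = pvConjOk c := by
  by_cases h2 : '|' ∈ c
  · have hc : c ≠ [] := by intro h; subst h; simp at h2
    obtain ⟨a, t, hat⟩ := List.exists_cons_of_ne_nil hc
    subst hat
    have hsw : PySem.Chars.startswith (a :: t) ['!'] = false := by
      rw [Bool.eq_false_iff]
      intro h
      rw [PySem.Chars.startswith_iff] at h
      obtain ⟨u, hu⟩ := h
      simp at hu
      exact hb (by simp [← hu.1])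
    have hI1 : PySem.Chars.isIn ['&'] (a :: t) = false := (pv_isIn_single_false _ _).mpr h1
    have hI2 : PySem.Chars.isIn ['|'] (a :: t) = true := (pv_isIn_single _ _).mpr h2
    rw [is_valid_condition_go.eq_def]
    simp only [List.isEmpty_cons, hsw, hI1, hI2, Bool.false_eq_true, if_false]
    rw [dif_neg not_false, dif_pos trivial]
    rw [pvConjOk]
    simp only [List.isEmpty_cons, hI2, if_true, Bool.not_false, Bool.true_and]
    rw [List.all_map, Bool.eq_iff_iff]
    simp only [List.all_eq_true, List.mem_attach, true_implies, Subtype.forall,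
      Function.comp_apply]
    constructor
    · intro hall p hp
      have hparts := pv_mem_splitOn_single '|' hp
      have hsubc : (pvNorm p).Sublist (a :: t) := (pv_norm_sublist p).trans hparts.2
      have hnb : '|' ∉ pvNorm p := fun h => hparts.1 ((pv_norm_sublist p).subset h)
      have hna : '&' ∉ pvNorm p := fun h => h1 (hsubc.subset h)
      have := hall p hp
      rw [pv_go_dropBangs, ← pvNorm] at this
      rw [← pv_go_leaf (pvNorm p) (pv_norm_head p) hna hnb]
      exact this
    · intro hall p hp
      have hparts := pv_mem_splitOn_single '|' hp
      have hsubc : (pvNorm p).Sublist (a :: t) := (pv_norm_sublist p).trans hparts.2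
      have hnb : '|' ∉ pvNorm p := fun h => hparts.1 ((pv_norm_sublist p).subset h)
      have hna : '&' ∉ pvNorm p := fun h => h1 (hsubc.subset h)
      have := hall p hp
      rw [pv_go_dropBangs, ← pvNorm]
      rw [pv_go_leaf (pvNorm p) (pv_norm_head p) hna hnb]
      exact this
  · rw [pv_go_leaf c hb h1 h2]
    rw [pvConjOk]
    have hI2 : PySem.Chars.isIn ['|'] c = false := (pv_isIn_single_false _ _).mpr h2
    rw [hI2]
    simp only [Bool.false_eq_true, if_false, pvDisjOk]
    cases c <;> simp

-- ===== VERDICT (by name: the statement is the Claim_ definition above) =====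
theorem is_valid_condition_spec : Claim_equal_is_valid_condition := by
  intro condition _
  unfold Spec_is_valid_condition is_valid_condition is_valid_condition_alt
  rw [pv_go_dropBangs]
  set d := condition.toList.dropWhile (· == '!') with hd
  have hbd : d.head? ≠ some '!' := by
    intro h
    have := pv_head_dropWhile (fun c => c == '!') condition.toList '!' h
    simp at this
  by_cases hE : d.isEmpty
  · have : d = [] := by simpa [List.isEmpty_iff] using hE
    rw [this]
    rw [is_valid_condition_go.eq_def]
    simp
  · simp only [hE, Bool.false_eq_true, if_false]
    by_cases hA : '&' ∈ d
    · have hc : d ≠ [] := by simpa [List.isEmpty_iff] using hE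
      obtain ⟨a, t, hat⟩ := List.exists_cons_of_ne_nil hc
      have hsw : PySem.Chars.startswith d ['!'] = false := by
        rw [Bool.eq_false_iff]
        intro h
        rw [PySem.Chars.startswith_iff] at h
        obtain ⟨u, hu⟩ := h
        rw [hat] at hu
        simp at hu
        exact hbd (by rw [hat]; simp [← hu.1])
      have hI1 : PySem.Chars.isIn ['&'] d = true := (pv_isIn_single _ _).mpr hA
      rw [is_valid_condition_go.eq_def]
      simp only [hE, hsw, hI1, Bool.false_eq_true, if_false, dif_pos]
      rw [if_pos trivial]
      rw [List.all_map, Bool.eq_iff_iff]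
      simp only [List.all_eq_true, List.mem_attach, true_implies, Subtype.forall,
        Function.comp_apply]
      constructor
      · intro hall p hp
        have hparts := pv_mem_splitOn_single '&' hp
        have hna : '&' ∉ pvNorm p := fun h => hparts.1 ((pv_norm_sublist p).subset h)
        have := hall p hp
        rw [pv_go_dropBangs, ← pvNorm] at this
        rw [← pv_go_conj (pvNorm p) (pv_norm_head p) hna]
        exact this
      · intro hall p hp
        have hparts := pv_mem_splitOn_single '&' hp
        have hna : '&' ∉ pvNorm p := fun h => hparts.1 ((pv_norm_sublist p).subset h)
        have := hall p hp
        rw [pv_go_dropBangs, ← pvNorm]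
        rw [pv_go_conj (pvNorm p) (pv_norm_head p) hna]
        exact this
    · have hI1 : PySem.Chars.isIn ['&'] d = false := (pv_isIn_single_false _ _).mpr hA
      rw [hI1]
      simp only [Bool.false_eq_true, if_false]
      exact pv_go_conj d hbd hA
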